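-- pv_equiv track=rewrite | github.com/Eloyye/leetcode | python/binary_search/closest_line.py | find_closest_line
-- ===== SOURCE A (Python) =====
-- def find_closest_line(next_lines : list[int], offset: int) -> int:
--     if not next_lines:
--         return 1
--     l, r = 0, len(next_lines) - 1
--     while r > l:
--         mid = (r + l) // 2
--         if next_lines[mid] > offset:
--             r = mid
--         else:
--             l = mid + 1
--     return l
-- ===== SOURCE B (Python) =====
-- def find_closest_line(next_lines: list[int], offset: int) -> int:
--     if not next_lines:
--         return 1
--     for i, v in enumerate(next_lines):
--         if v > offset:
--             return i
--     return len(next_lines) - 1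
-- ===== Notes on version B (the rewrite author's own statement) =====
-- stated objective: simpler
-- what changed: Replaces the l/r binary-search loop by a single left-to-right scan returning the first index whose value exceeds offset (len-1 if none); equivalence is claimed where the predicate 'value > offset' is monotone along the list (in particular on every sorted list), the binary search's contract.
-- outside the precondition, e.g. on find_closest_line([5, 1, 9], 2): A returns 2, B returns 0
import Mathlib
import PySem

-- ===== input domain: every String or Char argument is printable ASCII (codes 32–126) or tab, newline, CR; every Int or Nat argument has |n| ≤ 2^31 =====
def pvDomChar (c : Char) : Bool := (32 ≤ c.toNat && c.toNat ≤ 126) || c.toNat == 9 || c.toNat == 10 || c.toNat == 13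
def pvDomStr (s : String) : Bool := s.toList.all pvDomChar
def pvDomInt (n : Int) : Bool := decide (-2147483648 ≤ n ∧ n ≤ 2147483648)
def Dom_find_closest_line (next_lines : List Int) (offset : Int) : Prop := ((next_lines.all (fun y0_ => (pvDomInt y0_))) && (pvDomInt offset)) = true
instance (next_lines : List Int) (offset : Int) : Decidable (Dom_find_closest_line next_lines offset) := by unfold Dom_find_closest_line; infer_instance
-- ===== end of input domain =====

-- B replaces A's binary search by a single left-to-right scan (first index with value > offset,
-- len-1 if none); simpler, and equal on Pre_ (sorted input), the natural domain of a binary search.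


-- ===== PORT A =====
-- the while-loop of A; mid is always a valid index (0 ≤ l ≤ mid < r ≤ len-1), so pyGetD is exact here
def findClosestLoopA (next_lines : List Int) (offset l r : Int) : Int :=
  if r > l then
    let mid := PySem.Int.floordiv (r + l) 2
    if PySem.List.pyGetD next_lines mid 0 > offset then
      findClosestLoopA next_lines offset l mid
    else
      findClosestLoopA next_lines offset (mid + 1) r
  else l
termination_by (r - l).toNat
decreasing_by
  all_goals
    have e1 : PySem.Int.floordiv (r + l) 2 = (r + l) / 2 :=
      PySem.Int.floordiv_eq_ediv_of_pos (by omega)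
    omega

def find_closest_line (next_lines : List Int) (offset : Int) : Int :=
  if next_lines = [] then 1
  else findClosestLoopA next_lines offset 0 ((next_lines.length : Int) - 1)

-- ===== PORT B =====
-- the for-loop of B: first index i (counting from i0) whose value exceeds offset, none otherwise
def findClosestScanB (next_lines : List Int) (offset i0 : Int) : Option Int :=
  match next_lines with
  | [] => none
  | v :: t => if v > offset then some i0 else findClosestScanB t offset (i0 + 1)

def find_closest_line_alt (next_lines : List Int) (offset : Int) : Int :=
  if next_lines = [] then 1
  else (findClosestScanB next_lines offset 0).getD ((next_lines.length : Int) - 1)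

-- ===== PRECONDITION & SPEC =====
-- Pre_ excludes inputs where the predicate "value > offset" is not monotone along the list
-- (the list is unsorted around the threshold), outside the binary search's contract; there A
-- still returns an index, but one that depends on the search's probe order.
def Pre_find_closest_line (next_lines : List Int) (offset : Int) : Prop :=
  next_lines.Pairwise (fun x y => offset < x → offset < y)
instance (next_lines : List Int) (offset : Int) : Decidable (Pre_find_closest_line next_lines offset) := by unfold Pre_find_closest_line; infer_instance

def pvWitness_find_closest_line : List Int × Int := ([1, 3, 3, 7], 4)

def Spec_find_closest_line (next_lines : List Int) (offset : Int) (out : Int) : Prop := out = find_closest_line_alt next_lines offset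
instance (next_lines : List Int) (offset : Int) (out : Int) : Decidable (Spec_find_closest_line next_lines offset out) := by unfold Spec_find_closest_line; infer_instance

-- ===== CLAIM (what is proved, stated in full; the proofs are below) =====
def Claim_equal_find_closest_line : Prop := ∀ (next_lines : List Int) (offset : Int), Dom_find_closest_line next_lines offset → Pre_find_closest_line next_lines offset → Spec_find_closest_line next_lines offset (find_closest_line next_lines offset)

-- ===== LEMMAS AND PROOFS =====

-- integer-index read used throughout the proofs
def idxI (a : List Int) (i : Int) : Int := a.getD i.toNat 0

lemma pyGetD_eq_idxI (a : List Int) (i : Int) (h0 : 0 ≤ i) (h1 : i < (a.length : Int)) :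
    PySem.List.pyGetD a i 0 = idxI a i := by
  rw [PySem.List.pyGetD_eq_getElem a 0 h0 h1]
  unfold idxI
  exact (List.getD_eq_getElem a 0 (show i.toNat < a.length by omega)).symm

lemma mono_idxI (a : List Int) (offset : Int)
    (hs : a.Pairwise (fun x y => offset < x → offset < y)) (i j : Int)
    (h0 : 0 ≤ i) (hij : i ≤ j) (hj : j < (a.length : Int)) (hi : offset < idxI a i) :
    offset < idxI a j := by
  unfold idxI at *
  rcases eq_or_lt_of_le hij with h | h
  · subst h; exact hi
  · rw [List.getD_eq_getElem a 0 (show j.toNat < a.length by omega)]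
    rw [List.getD_eq_getElem a 0 (show i.toNat < a.length by omega)] at hi
    exact (List.pairwise_iff_getElem.mp hs) i.toNat j.toNat (by omega) (by omega) (by omega) hi

-- A's loop returns T whenever T is bracketed by [l, r] and T is a "first crossing or last index"
lemma loopA_eq (a : List Int) (offset T : Int)
    (hs : a.Pairwise (fun x y => offset < x → offset < y)) :
    ∀ l r : Int, 0 ≤ l → l ≤ T → T ≤ r → r ≤ (a.length : Int) - 1 →
    (∀ i : Int, 0 ≤ i → i < T → idxI a i ≤ offset) →
    (T = (a.length : Int) - 1 ∨ offset < idxI a T) →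
    findClosestLoopA a offset l r = T := by
  intro l r
  induction h : (r - l).toNat using Nat.strong_induction_on generalizing l r with
  | _ n ih =>
    intro hl0 hlT hTr hr hlow hT
    by_cases hrl : r > l
    · set mid := PySem.Int.floordiv (r + l) 2 with hmiddef
      have hE : mid = (r + l) / 2 := PySem.Int.floordiv_eq_ediv_of_pos (by omega)
      have hmidge : l ≤ mid := by omega
      have hmidlt : mid < r := by omega
      have hstep : findClosestLoopA a offset l r =
          if PySem.List.pyGetD a mid 0 > offset then findClosestLoopA a offset l mid
          else findClosestLoopA a offset (mid + 1) r := by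
        rw [findClosestLoopA, if_pos hrl]
      rw [hstep, pyGetD_eq_idxI a mid (by omega) (by omega)]
      by_cases hc : idxI a mid > offset
      · rw [if_pos hc]
        have hTmid : T ≤ mid := by
          by_contra hcon
          exact absurd (hlow mid (by omega) (by omega)) (by omega)
        exact ih (mid - l).toNat (by omega) l mid rfl hl0 hlT hTmid (by omega) hlow hT
      · rw [if_neg hc]
        have hTmid : mid + 1 ≤ T := by
          by_contra hcon
          have hTle : T ≤ mid := by omega
          rcases hT with h' | h'
          · omega
          · have := mono_idxI a offset hs T mid (by omega) hTle (by omega) h'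
            omega
        exact ih (r - (mid + 1)).toNat (by omega) (mid + 1) r rfl (by omega) hTmid hTr hr hlow hT
    · rw [findClosestLoopA, if_neg hrl]
      omega

-- B's scan: characterisation of its result
lemma scanB_some (offset : Int) : ∀ (a : List Int) (i0 k : Int),
    findClosestScanB a offset i0 = some k →
    i0 ≤ k ∧ k - i0 < (a.length : Int) ∧ offset < idxI a (k - i0) ∧
    (∀ j : Int, 0 ≤ j → j < k - i0 → idxI a j ≤ offset) := by
  intro a
  induction a with
  | nil => intro i0 k h; simp [findClosestScanB] at h
  | cons v t ih =>
    intro i0 k h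
    unfold findClosestScanB at h
    by_cases hv : v > offset
    · rw [if_pos hv] at h
      injection h with h
      subst h
      refine ⟨le_refl _, by simp, ?_, ?_⟩
      · simpa [idxI] using hv
      · intro j _ hj; omega
    · rw [if_neg hv] at h
      obtain ⟨h1, h2, h3, h4⟩ := ih (i0 + 1) k h
      refine ⟨by omega, by simp; omega, ?_, ?_⟩
      · have heq : idxI (v :: t) (k - i0) = idxI t (k - (i0 + 1)) := by
          unfold idxI
          have hn : (k - i0).toNat = (k - (i0 + 1)).toNat + 1 := by omega
          rw [hn, List.getD_cons_succ]
        rw [heq]; exact h3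
      · intro j hj0 hj
        rcases eq_or_lt_of_le hj0 with h' | h'
        · have : idxI (v :: t) j = v := by simp [idxI, ← h']
          rw [this]; omega
        · have heq : idxI (v :: t) j = idxI t (j - 1) := by
            unfold idxI
            have hn : j.toNat = (j - 1).toNat + 1 := by omega
            rw [hn, List.getD_cons_succ]
          rw [heq]
          exact h4 (j - 1) (by omega) (by omega)

lemma scanB_none (offset : Int) : ∀ (a : List Int) (i0 : Int),
    findClosestScanB a offset i0 = none →
    ∀ j : Int, 0 ≤ j → j < (a.length : Int) → idxI a j ≤ offset := by
  intro a
  induction a with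
  | nil => intro i0 _ j _ hj; simp at hj; omega
  | cons v t ih =>
    intro i0 h j hj0 hj
    unfold findClosestScanB at h
    by_cases hv : v > offset
    · rw [if_pos hv] at h; exact absurd h (by simp)
    · rw [if_neg hv] at h
      rcases eq_or_lt_of_le hj0 with h' | h'
      · have : idxI (v :: t) j = v := by simp [idxI, ← h']
        rw [this]; omega
      · have heq : idxI (v :: t) j = idxI t (j - 1) := by
          unfold idxI
          have hn : j.toNat = (j - 1).toNat + 1 := by omega
          rw [hn, List.getD_cons_succ]
        rw [heq]
        exact ih (i0 + 1) h (j - 1) (by omega) (by simp at hj; omega)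

-- ===== VERDICT (by name: the statement is the Claim_ definition above) =====
theorem find_closest_line_spec : Claim_equal_find_closest_line := by
  intro a offset _ hpre
  unfold Spec_find_closest_line find_closest_line find_closest_line_alt
  by_cases hnil : a = []
  · simp [hnil]
  · simp only [hnil, if_neg, not_false_iff]
    have hlen : 1 ≤ (a.length : Int) := by
      cases a with
      | nil => exact absurd rfl hnil
      | cons x t => simp
    cases hscan : findClosestScanB a offset 0 with
    | none =>
      simp only [Option.getD_none]
      exact loopA_eq a offset ((a.length : Int) - 1) hpre 0 ((a.length : Int) - 1)
        (le_refl 0) (by omega) (le_refl _) (le_refl _)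
        (fun i hi0 hi => scanB_none offset a 0 hscan i hi0 (by omega))
        (Or.inl rfl)
    | some k =>
      simp only [Option.getD_some]
      obtain ⟨h1, h2, h3, h4⟩ := scanB_some offset a 0 k hscan
      simp only [sub_zero] at h2 h3 h4
      exact loopA_eq a offset k hpre 0 ((a.length : Int) - 1)
        (le_refl 0) h1 (by omega) (le_refl _)
        h4 (Or.inr h3)
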